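-- pv_equiv track=rewrite | github.com/dongh94/COSProSample | 1차 1급 4_initial_code.py | solution
-- ===== SOURCE A (Python) =====
-- def solution(num):
--     # Write code here.
--     answer = num + 1
--     num += 1
--     while True:
--         flag = False
--         while num > 0:
--             if num % 10 != 0:
--                 num //= 10
--
--             else: # 0이 발견됨.
--                 flag = True
--                 break
--
--         if flag:
--             num = answer + 1
--             answer += 1
--         else:
--             break
--
--     return answer
-- ===== SOURCE B (Python) =====
-- def solution(num):
--     # Digit-by-digit: find the most significant zero digit of num+1;
--     # replace it and everything below by ones.  O(digits) instead of counting up.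
--     n = num + 1
--     if n <= 0:
--         return n
--     t, pos, j = n, 0, -1
--     while t > 0:
--         if t % 10 == 0:
--             j = pos
--         t //= 10
--         pos += 1
--     if j < 0:
--         return n
--     p = 10 ** (j + 1)
--     return (n // p) * p + (p - 1) // 9
-- ===== Notes on version B (the rewrite author's own statement) =====
-- stated objective: faster
-- what changed: Instead of counting upward from the successor of num and re-scanning every candidate's digits until a zero-free value appears, B scans the successor's digits once, locates the most significant zero digit, and builds the answer in closed form by replacing that digit and all lower digits with the digit one.
import Mathlib
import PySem

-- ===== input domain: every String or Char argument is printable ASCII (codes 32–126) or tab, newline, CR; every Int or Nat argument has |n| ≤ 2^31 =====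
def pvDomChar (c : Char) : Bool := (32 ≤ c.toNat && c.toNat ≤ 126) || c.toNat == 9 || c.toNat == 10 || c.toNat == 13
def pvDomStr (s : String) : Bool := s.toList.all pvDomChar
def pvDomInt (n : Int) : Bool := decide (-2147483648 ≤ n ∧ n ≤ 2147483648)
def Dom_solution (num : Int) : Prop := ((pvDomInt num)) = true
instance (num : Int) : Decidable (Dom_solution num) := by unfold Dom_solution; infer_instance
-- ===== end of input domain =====

-- B replaces A's count-up-and-rescan search with a single digit scan and a closed-form
-- answer (replace the most significant zero digit and everything below it by ones).

-- ===== PORT A =====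
-- inner `while num > 0` loop of A: returns the flag (True iff a zero digit was found)
def solInner (n : Int) : Bool :=
  if _h : 0 < n then
    if PySem.Int.mod n 10 ≠ 0 then solInner (PySem.Int.floordiv n 10) else true
  else false
termination_by n.toNat
decreasing_by
  rw [PySem.Int.floordiv_eq_ediv_of_pos (by norm_num)]
  omega

-- outer `while True` loop of A; the fuel only makes the recursion total (Lean needs a
-- decreasing measure); it is never exhausted on the stated domain (proved below)
def solOuter (answer num : Int) : Nat → Int
  | 0 => answer
  | f + 1 => if solInner num then solOuter (answer + 1) (answer + 1) f else answer

def solution (num : Int) : Int :=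
  solOuter (num + 1) (num + 1) (10 ^ 11)

-- ===== PORT B =====
-- the `while t > 0` scan of Source B: position of the most significant zero digit, or -1
def altScan (t pos j : Int) : Int :=
  if _h : 0 < t then
    altScan (PySem.Int.floordiv t 10) (pos + 1)
      (if PySem.Int.mod t 10 = 0 then pos else j)
  else j
termination_by t.toNat
decreasing_by
  rw [PySem.Int.floordiv_eq_ediv_of_pos (by norm_num)]
  omega

def solution_alt (num : Int) : Int :=
  let n := num + 1
  if n ≤ 0 then n
  else
    let j := altScan n 0 (-1)
    if j < 0 then n
    else
      -- Python `10 ** (j + 1)`: here j ≥ 0, so the Nat exponent (j+1).toNat is exact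
      let p : Int := 10 ^ (j + 1).toNat
      (PySem.Int.floordiv n p) * p + PySem.Int.floordiv (p - 1) 9

-- ===== PRECONDITION & SPEC =====
def Spec_solution (num : Int) (out : Int) : Prop := out = solution_alt num
instance (num : Int) (out : Int) : Decidable (Spec_solution num out) := by unfold Spec_solution; infer_instance

-- ===== CLAIM (what is proved, stated in full; the proofs are below) =====
def Claim_equal_solution : Prop := ∀ (num : Int), Dom_solution num → Spec_solution num (solution num)

-- ===== LEMMAS AND PROOFS =====

-- repunit: k ones
def rep : Nat → Int
  | 0 => 0
  | k + 1 => 10 * rep k + 1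

theorem rep_nonneg (k : Nat) : 0 ≤ rep k := by
  induction k with
  | zero => simp [rep]
  | succ k ih => simp only [rep]; omega

theorem nine_rep (k : Nat) : 9 * rep k + 1 = 10 ^ k := by
  induction k with
  | zero => simp [rep]
  | succ k ih => simp only [rep, pow_succ]; omega

theorem rep_lt_pow (k : Nat) : rep k < 10 ^ k := by
  have := nine_rep k; have := rep_nonneg k; omega

theorem pow_le_rep_succ (k : Nat) : 10 ^ k ≤ rep (k + 1) := by
  have := nine_rep k; have := rep_nonneg k; simp only [rep]; omega

theorem rep_ediv_pow (k i : Nat) (h : i ≤ k) : rep k / 10 ^ i = rep (k - i) := by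
  induction i with
  | zero => simp
  | succ i ih =>
    have hik : i ≤ k := by omega
    have h1 : rep k / 10 ^ (i + 1) = rep k / 10 ^ i / 10 := by
      rw [pow_succ, ← Int.ediv_ediv_of_nonneg (show (0:Int) ≤ 10 ^ i by positivity)]
    have hidx : k - (i + 1) = k - i - 1 := by omega
    have h2 : rep (k - i) = 10 * rep (k - i - 1) + 1 := by
      obtain ⟨m, hm⟩ : ∃ m, k - i = m + 1 := ⟨k - i - 1, by omega⟩
      rw [hm]
      simp only [rep, Nat.add_sub_cancel]
    rw [h1, ih hik, h2, hidx]
    have := rep_nonneg (k - i - 1)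
    omega

theorem rep_emod_ten (k : Nat) (h : 1 ≤ k) : rep k % 10 = 1 := by
  have h1 : k = (k - 1) + 1 := by omega
  rw [h1, rep]
  have := rep_nonneg (k - 1)
  omega

-- "n has a zero digit" (positions with 10^i ≤ n, so the digit really exists)
def hasZ (n : Int) : Prop := ∃ i : Nat, 10 ^ i ≤ n ∧ (n / 10 ^ i) % 10 = 0

theorem ediv_pow_succ (n : Int) (i : Nat) : n / 10 ^ (i + 1) = n / 10 / 10 ^ i := by
  rw [pow_succ', ← Int.ediv_ediv_of_nonneg (show (0:Int) ≤ 10 by norm_num)]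

-- A's inner loop decides hasZ
theorem solInner_iff (n : Int) : solInner n = true ↔ (0 < n ∧ hasZ n) := by
  by_cases hn : 0 < n
  · rw [solInner, dif_pos hn]
    rw [PySem.Int.mod_eq_emod_of_pos (by norm_num), PySem.Int.floordiv_eq_ediv_of_pos (by norm_num)]
    by_cases hm : n % 10 = 0
    · rw [if_neg (by simpa using hm)]
      constructor
      · intro _
        refine ⟨hn, 0, by norm_num; omega, by simpa using hm⟩
      · intro _; rfl
    · rw [if_pos (by simpa using hm)]
      rw [solInner_iff (n / 10)]
      constructor
      · rintro ⟨hd, i, hle, hdig⟩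
        refine ⟨hn, i + 1, ?_, ?_⟩
        · have h1 : 10 ^ i * 10 ≤ (n / 10) * 10 :=
            mul_le_mul_of_nonneg_right hle (by norm_num)
          have h2 := Int.ediv_mul_le n (show (10:Int) ≠ 0 by norm_num)
          rw [pow_succ]; omega
        · rw [ediv_pow_succ]; exact hdig
      · rintro ⟨-, i, hle, hdig⟩
        cases i with
        | zero =>
          simp only [pow_zero, Int.ediv_one] at hdig
          exact absurd hdig hm
        | succ i =>
          have hle' : 10 ^ i ≤ n / 10 := by
            rw [Int.le_ediv_iff_mul_le (by norm_num)]
            rw [pow_succ] at hle; omega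
          have hp0 : (0:Int) < 10 ^ i := by positivity
          refine ⟨by omega, i, hle', by rw [ediv_pow_succ] at hdig; exact hdig⟩
  · rw [solInner, dif_neg hn]
    simp [hn]
termination_by n.toNat
decreasing_by omega

-- the scan invariant: (found position is valid and its digit is 0) ∧ (no zero digit above it) ∧ j ≤ result
theorem altScan_spec (t pos j : Int) (ht : 0 ≤ t) (hj : j < pos) :
    (altScan t pos j = j ∨
      (pos ≤ altScan t pos j ∧ 10 ^ (altScan t pos j - pos).toNat ≤ t ∧
        (t / 10 ^ (altScan t pos j - pos).toNat) % 10 = 0)) ∧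
    (∀ i : Nat, altScan t pos j < pos + i → 10 ^ i ≤ t → (t / 10 ^ i) % 10 ≠ 0) ∧
    j ≤ altScan t pos j := by
  by_cases hpos : 0 < t
  · rw [altScan, dif_pos hpos]
    rw [PySem.Int.mod_eq_emod_of_pos (by norm_num), PySem.Int.floordiv_eq_ediv_of_pos (by norm_num)]
    set j' : Int := if t % 10 = 0 then pos else j with hj'
    have hj'lt : j' < pos + 1 := by rw [hj']; split <;> omega
    have hj'ge : j ≤ j' := by rw [hj']; split <;> omega
    obtain ⟨ih1, ih2, ih3⟩ := altScan_spec (t / 10) (pos + 1) j' (by omega) hj'lt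
    set r := altScan (t / 10) (pos + 1) j' with hr
    refine ⟨?_, ?_, by omega⟩
    · rcases ih1 with h | ⟨h1, h2, h3⟩
      · by_cases hm : t % 10 = 0
        · have hrpos : r = pos := by rw [h, hj', if_pos hm]
          right
          rw [hrpos]
          simp only [sub_self, Int.toNat_zero, pow_zero]
          exact ⟨le_refl _, by omega, by simpa using hm⟩
        · left; rw [h, hj', if_neg hm]
      · right
        have hk : (r - pos).toNat = (r - (pos + 1)).toNat + 1 := by omega
        refine ⟨by omega, ?_, ?_⟩
        · rw [hk, pow_succ]
          have hmul : 10 ^ (r - (pos + 1)).toNat * 10 ≤ (t / 10) * 10 :=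
            mul_le_mul_of_nonneg_right h2 (by norm_num)
          have := Int.ediv_mul_le t (show (10:Int) ≠ 0 by norm_num)
          omega
        · rw [hk, ediv_pow_succ]; exact h3
    · intro i hi hle
      cases i with
      | zero =>
        simp only [pow_zero, Int.ediv_one]
        intro hm0
        have hjp : j' = pos := by rw [hj', if_pos hm0]
        omega
      | succ i =>
        have hle' : 10 ^ i ≤ t / 10 := by
          rw [Int.le_ediv_iff_mul_le (by norm_num)]
          rw [pow_succ] at hle; omega
        rw [ediv_pow_succ]
        exact ih2 i (by omega) hle'
  · rw [altScan, dif_neg hpos]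
    refine ⟨Or.inl rfl, ?_, le_refl _⟩
    intro i _ hle
    have : (0:Int) < 10 ^ i := by positivity
    omega
termination_by t.toNat
decreasing_by omega

-- a % (b*c) = b * ((a/b) % c) + a % b
theorem emod_mul_decomp (a b c : Int) (hb : 0 < b) (hc : 0 < c) :
    a % (b * c) = b * ((a / b) % c) + a % b := by
  rw [Int.emod_def a (b * c), Int.emod_def (a / b) c, Int.emod_def a b,
    ← Int.ediv_ediv_of_nonneg (le_of_lt hb)]
  ring

-- any 0 ≤ low < rep K has a zero digit among its K low positions
theorem below_rep_has_zero (K : Nat) (low : Int) (h0 : 0 ≤ low) (h : low < rep K) :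
    ∃ i : Nat, i < K ∧ (low / 10 ^ i) % 10 = 0 := by
  induction K generalizing low with
  | zero => simp [rep] at h; omega
  | succ K ih =>
    by_cases hm : low % 10 = 0
    · exact ⟨0, by omega, by simpa using hm⟩
    · have hR := rep_nonneg K
      have hrec : low / 10 < rep K := by
        simp only [rep] at h
        omega
      obtain ⟨i, hi, hd⟩ := ih (low / 10) (by omega) hrec
      exact ⟨i + 1, by omega, by rw [ediv_pow_succ]; exact hd⟩

-- the fuel-indexed outer loop reaches the least good value ≥ a
theorem solOuter_reaches (fuel : Nat) :
    ∀ a C : Int, a ≤ C → (C - a).toNat < fuel → solInner C = false →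
      (∀ m, a ≤ m → m < C → solInner m = true) → solOuter a a fuel = C := by
  induction fuel with
  | zero => intro a C h1 h2 _ _; omega
  | succ f ih =>
    intro a C h1 h2 hC hmin
    by_cases hac : a = C
    · subst hac
      simp [solOuter, hC]
    · have ha : solInner a = true := hmin a (le_refl _) (by omega)
      simp only [solOuter, ha, if_true]
      exact ih (a + 1) C (by omega) (by omega) hC (fun m hm1 hm2 => hmin m (by omega) hm2)

theorem pow_le_of_ediv_pos (n : Int) (i : Nat) (h : 1 ≤ n / 10 ^ i) : 10 ^ i ≤ n := by
  have h2 := (Int.le_ediv_iff_mul_le (b := n) (c := (10:Int) ^ i)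
    (show (0:Int) < 10 ^ i by positivity)).mp h
  linarith

-- the main equivalence
theorem solution_eq (num : Int) (hdom : Dom_solution num) : solution num = solution_alt num := by
  have hnum : num ≤ 2147483648 := by
    unfold Dom_solution pvDomInt at hdom
    simp at hdom; omega
  set n := num + 1 with hn
  by_cases hle : n ≤ 0
  · -- A: inner loop immediately false, outer loop returns n; B: returns n
    have hinner : solInner n = false := by
      rw [solInner, dif_neg (by omega : ¬ (0:Int) < n)]
    have hA : solution num = n := by
      unfold solution
      simp only [← hn]
      rw [show (10 ^ 11 : Nat) = 10 ^ 11 - 1 + 1 by norm_num]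
      simp [solOuter, hinner]
    rw [hA]
    simp only [solution_alt, ← hn]
    rw [if_pos hle]
  · push_neg at hle
    obtain ⟨sc1, sc2, sc3⟩ := altScan_spec n 0 (-1) (by omega) (by omega)
    set J := altScan n 0 (-1) with hJ
    by_cases hJneg : J < 0
    · -- no zero digit: both return n
      have hJm1 : J = -1 := by omega
      have hinner : solInner n = false := by
        rw [← Bool.not_eq_true, solInner_iff]
        rintro ⟨-, i, hle', hd⟩
        exact sc2 i (by omega) hle' hd
      have hA : solution num = n := by
        unfold solution
        simp only [← hn]
        exact solOuter_reaches _ n n (le_refl _) (by norm_num) hinner (by omega)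
      rw [hA]
      simp only [solution_alt, ← hn, ← hJ]
      rw [if_neg (by omega), if_pos (by omega)]
    · push_neg at hJneg
      rcases sc1 with h | ⟨-, hvk, hdk⟩
      · omega
      set k : Nat := (J - 0).toNat with hk
      set K : Nat := k + 1 with hK
      set p : Int := 10 ^ K with hp
      have hppos : (0:Int) < p := by rw [hp]; positivity
      have hpk : (0:Int) < 10 ^ k := by positivity
      set H : Int := n / p with hH
      set C : Int := H * p + rep K with hC
      have hHnn : 0 ≤ H := by
        rw [hH]; exact Int.ediv_nonneg (by omega) (by omega)
      have hHp_le : H * p ≤ n := by rw [hH]; exact Int.ediv_mul_le n (by omega)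
      have hpow_split : ∀ i : Nat, i ≤ K → (10:Int) ^ (K - i) * 10 ^ i = p := by
        intro i hi
        rw [hp, ← pow_add]
        congr 1; omega
      -- n % p < rep K  (the digit at position k of n is 0)
      have hmodsmall : n % p < rep K := by
        have hdec : n % p = 10 ^ k * ((n / 10 ^ k) % 10) + n % 10 ^ k := by
          have h10 := emod_mul_decomp n (10 ^ k) 10 hpk (by norm_num)
          rw [hp, hK, pow_succ]
          exact h10
        have hm10 : n % 10 ^ k < 10 ^ k := Int.emod_lt_of_pos n hpk
        have hm0 : 0 ≤ n % 10 ^ k := Int.emod_nonneg n (by omega)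
        have hps : 10 ^ k ≤ rep K := by rw [hK]; exact pow_le_rep_succ k
        rw [hdec, hdk]
        omega
      have hmodnn : 0 ≤ n % p := Int.emod_nonneg n (by omega)
      have hnsplit : H * p + n % p = n := by
        rw [hH]; exact Int.ediv_mul_add_emod n p
      have hnC : n < C := by rw [hC]; linarith
      -- C has no zero digit
      have hCgood : solInner C = false := by
        rw [← Bool.not_eq_true, solInner_iff]
        rintro ⟨-, i, hile, hid⟩
        by_cases hiK : i < K
        · -- low digits of C are those of rep K, all equal to 1
          have hsplit : C = rep K + (H * 10 ^ (K - i)) * 10 ^ i := by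
            rw [hC, mul_assoc, hpow_split i (by omega)]; ring
          have hdig1 : (C / 10 ^ i) % 10 = 1 := by
            rw [hsplit, Int.add_mul_ediv_right _ _ (show (10:Int) ^ i ≠ 0 by positivity),
              rep_ediv_pow K i (by omega)]
            have hform : H * 10 ^ (K - i) = (H * 10 ^ (K - i - 1)) * 10 := by
              obtain ⟨m, hm⟩ : ∃ m, K - i = m + 1 := ⟨K - i - 1, by omega⟩
              rw [hm, pow_succ, ← mul_assoc]
              simp only [Nat.add_sub_cancel]
            rw [hform, Int.add_mul_emod_self_right]
            exact rep_emod_ten _ (by omega)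
          omega
        · -- high digits of C are the digits of n above position k, all nonzero
          push_neg at hiK
          have hCK : C / p = H := by
            rw [hC, add_comm, Int.add_mul_ediv_right _ _ (by omega),
              Int.ediv_eq_zero_of_lt (rep_nonneg K) (by rw [hp]; exact rep_lt_pow K)]
            omega
          have hCi : C / 10 ^ i = n / 10 ^ i := by
            have h1 : C / 10 ^ i = C / p / 10 ^ (i - K) := by
              rw [Int.ediv_ediv_of_nonneg (by omega), hp, ← pow_add]
              congr 2; omega
            have h2 : n / 10 ^ i = n / p / 10 ^ (i - K) := by
              rw [Int.ediv_ediv_of_nonneg (by omega), hp, ← pow_add]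
              congr 2; omega
            rw [h1, h2, hCK, hH]
          have hpos0 : 1 ≤ C / 10 ^ i :=
            (Int.le_ediv_iff_mul_le (by positivity)).mpr (by linarith)
          have hpos' : 1 ≤ n / 10 ^ i := hCi ▸ hpos0
          have hvalid : 10 ^ i ≤ n := pow_le_of_ediv_pos n i hpos'
          exact sc2 i (by omega) hvalid (by rw [← hCi]; exact hid)
      -- everything in [n, C) still has a zero digit
      have hmin : ∀ m, n ≤ m → m < C → solInner m = true := by
        intro m hm1 hm2
        rw [solInner_iff]
        refine ⟨by omega, ?_⟩
        set low : Int := m - H * p with hlow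
        have hlow0 : 0 ≤ low := by rw [hlow]; linarith
        have hlowlt : low < rep K := by
          rw [hC] at hm2; rw [hlow]; linarith
        obtain ⟨i, hiK, hid⟩ := below_rep_has_zero K low hlow0 hlowlt
        refine ⟨i, ?_, ?_⟩
        · have h10 : (10:Int) ^ i ≤ 10 ^ k := pow_le_pow_right₀ (by norm_num) (by omega)
          linarith
        · have hmsplit : m = low + (H * 10 ^ (K - i)) * 10 ^ i := by
            rw [hlow, mul_assoc, hpow_split i (by omega)]; ring
          rw [hmsplit, Int.add_mul_ediv_right _ _ (show (10:Int) ^ i ≠ 0 by positivity)]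
          have hform : H * 10 ^ (K - i) = (H * 10 ^ (K - i - 1)) * 10 := by
            obtain ⟨m, hm⟩ : ∃ m, K - i = m + 1 := ⟨K - i - 1, by omega⟩
            rw [hm, pow_succ, ← mul_assoc]
            simp only [Nat.add_sub_cancel]
          rw [hform, Int.add_mul_emod_self_right]
          exact hid
      -- fuel bound: C - n ≤ rep K < p = 10 * 10^k ≤ 10 * n ≤ 10 * (2^31 + 2) < 10^11
      have hfuel : (C - n).toNat < 10 ^ 11 := by
        have h1 : C - n ≤ rep K := by rw [hC]; linarith
        have h2 : rep K < p := by rw [hp]; exact rep_lt_pow K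
        have h3 : p = 10 * 10 ^ k := by rw [hp, hK, pow_succ]; ring
        have h5 : n ≤ 2147483649 := by omega
        omega
      have hA : solution num = C := by
        unfold solution
        simp only [← hn]
        exact solOuter_reaches _ n C (by omega) hfuel hCgood hmin
      have hB : solution_alt num = C := by
        simp only [solution_alt, ← hn, ← hJ]
        rw [if_neg (by omega), if_neg (by omega)]
        have hJk : (J + 1).toNat = K := by omega
        rw [hJk,
          PySem.Int.floordiv_eq_ediv_of_pos (show (0:Int) < 10 ^ K by positivity),
          PySem.Int.floordiv_eq_ediv_of_pos (show (0:Int) < 9 by norm_num),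
          ← hp, ← hH, hC]
        congr 1
        have h9 : 9 * rep K = p - 1 := by
          have := nine_rep K; rw [hp]; omega
        rw [← h9, Int.mul_ediv_cancel_left _ (by norm_num)]
      rw [hA, hB]

-- ===== VERDICT (by name: the statement is the Claim_ definition above) =====
theorem solution_spec : Claim_equal_solution := by
  intro num hdom
  unfold Spec_solution
  exact solution_eq num hdom
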